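-- pv_equiv track=rewrite | github.com/jianzhang-lu/Undergraduate | ZJE_courses/6. BMI3/Workshop/L14 Exam/20 Mock Exam.py | findSeqOccurance
-- ===== SOURCE A (Python) =====
-- def getNeighbors(cur_row, cur_col, n_row, n_col) -> list:
--     directions = [[cur_row, cur_col-1],
--                   [cur_row, cur_col+1],
--                   [cur_row-1, cur_col],
--                   [cur_row+1, cur_col]]
--     neighbors = []
--     for row, col in directions:
--         if 0 <= row < n_row and 0 <= col < n_col:
--             neighbors.append([row, col])
--     return neighbors
--
-- def isFinal(m: list, path: list, s: str) -> bool: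
--     cur_s = ''
--     for i in path:
--         row, col = i
--         sub_s = m[row][col]
--         cur_s += sub_s
--     return cur_s == s
--
-- def dfs(m: list, s: str, start: list, path: list, count: int) -> int:
--     n_row = len(m)
--     n_col = len(m[0])
--     if isFinal(m, path, s):
--         count += 1
--         return count
--
--     for neighbor in getNeighbors(start[0], start[1], n_row, n_col):
--         if neighbor not in path and m[neighbor[0]][neighbor[1]] == s[len(path)]:
--             path.append(neighbor)
--             count = dfs(m, s, neighbor, path, count)
--             path.pop()
--     return count
--
-- def findSeqOccurance(m: list, s: str) -> int:
--     """
--     @arg m: a matrix containing nucleotide characters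
--     @arg s: the sequence to be searched
--     Exapmle:
--         findSeqOccurance(m, "GTTCCA") # returns 7
--         findSeqOccurance(m, "CATAGACA") # returns 2
--         findSeqOccurance(m, "GTCAGATCA") # returns 9
--     """
--     count = 0
--     for row in range(len(m)):
--         for col in range(len(m[0])):
--             if m[row][col] == s[0]:
--                 start = [row, col]
--                 count += dfs(m, s, start, [start], 0)
--     return count
-- ===== SOURCE B (Python) =====
-- def findSeqOccurance(m: list, s: str) -> int:
--     n_row = len(m)
--     n_col = len(m[0]) if m else 0
--     # frontier of partial states: (current cell, frozenset of visited cells)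
--     states = [((r, c), frozenset([(r, c)]))
--               for r in range(n_row) for c in range(n_col)
--               if m[r][c] == s[0]]
--     for ch in s[1:]:
--         new_states = []
--         for (r, c), vis in states:
--             for nr, nc in ((r, c - 1), (r, c + 1), (r - 1, c), (r + 1, c)):
--                 if (0 <= nr < n_row and 0 <= nc < n_col
--                         and (nr, nc) not in vis and m[nr][nc] == ch):
--                     new_states.append(((nr, nc), vis | {(nr, nc)}))
--         states = new_states
--     return len(states)
-- ===== Notes on version B (the rewrite author's own statement) =====
-- stated objective: alternative
-- what changed: Replaces A's recursive backtracking DFS (mutable path list, count accumulator, string rebuilt and compared at every call) by an iterative layer-by-layer frontier expansion: a list of partial states (cell, visited set) is advanced once per character of s[1:] and the answer is the size of the final frontier.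
import Mathlib
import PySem

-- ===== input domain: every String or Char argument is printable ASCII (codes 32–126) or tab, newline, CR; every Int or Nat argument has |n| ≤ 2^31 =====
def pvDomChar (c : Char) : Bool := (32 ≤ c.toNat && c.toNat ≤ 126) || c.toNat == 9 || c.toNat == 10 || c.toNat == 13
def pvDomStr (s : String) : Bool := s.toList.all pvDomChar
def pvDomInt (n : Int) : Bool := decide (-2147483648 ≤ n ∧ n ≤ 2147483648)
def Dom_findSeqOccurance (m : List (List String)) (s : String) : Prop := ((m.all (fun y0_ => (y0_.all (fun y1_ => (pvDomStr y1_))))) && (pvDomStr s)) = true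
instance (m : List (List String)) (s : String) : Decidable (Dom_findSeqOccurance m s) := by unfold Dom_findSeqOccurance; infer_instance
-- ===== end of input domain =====

-- B replaces A's recursive backtracking DFS by an iterative layer-by-layer frontier expansion
-- over the characters of s: a list of partial states (cell, visited set) advanced once per
-- character; the answer is the size of the final frontier.

-- ===== PORT A =====
-- m[r][c] as a list of characters (indices are checked 0 ≤ · < len before every access)
def pvCellC (m : List (List String)) (r c : Int) : List Char :=
  ((m.getD r.toNat []).getD c.toNat "").toList

-- getNeighbors: the four candidate cells, kept when in bounds
def pvNeighbors (r c nRow nCol : Int) : List (Int × Int) :=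
  [(r, c - 1), (r, c + 1), (r - 1, c), (r + 1, c)].filter
    (fun p => decide (0 ≤ p.1) && decide (p.1 < nRow) && decide (0 ≤ p.2) && decide (p.2 < nCol))

-- isFinal: the string spelled by path (built by successive concatenation) equals s
def pvPathChars (m : List (List String)) (path : List (Int × Int)) : List Char :=
  path.foldl (fun acc p => acc ++ pvCellC m p.1 p.2) []

def pvIsFinal (m : List (List String)) (path : List (Int × Int)) (s : String) : Bool :=
  pvPathChars m path == s.toList

-- dfs of A, accumulator style; fuel only makes the recursion structural (nRow*nCol+1 always
-- suffices: the path holds distinct in-bounds cells, so the recursion depth is bounded)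
def pvDfsA (m : List (List String)) (s : String) :
    Nat → Int × Int → List (Int × Int) → Int → Int
  | 0, _, _, count => count
  | fuel + 1, start, path, count =>
    if pvIsFinal m path s then count + 1
    else
      (pvNeighbors start.1 start.2 (m.length : Int) ((m.headD []).length : Int)).foldl
        (fun cnt nb =>
          if nb ∉ path ∧ pvCellC m nb.1 nb.2 = [s.toList.getD path.length '?'] then
            pvDfsA m s fuel nb (path ++ [nb]) cnt
          else cnt) count

def findSeqOccurance (m : List (List String)) (s : String) : Int :=
  let nRow := m.length
  let nCol := (m.headD []).length
  (List.range nRow).foldl (fun (count : Int) (row : Nat) =>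
    (List.range nCol).foldl (fun (count : Int) (col : Nat) =>
      if pvCellC m (row : Int) (col : Int) = [s.toList.getD 0 '?'] then
        count + pvDfsA m s (nRow * nCol + 1) ((row : Int), (col : Int)) [((row : Int), (col : Int))] 0
      else count) count) 0

-- ===== PORT B =====
-- one layer of B's frontier expansion: every state spawns its matching unvisited in-bounds
-- neighbours (the inner double loop building new_states, in order)
def pvStep (m : List (List String)) (ch : Char)
    (states : List ((Int × Int) × PySem.Set (Int × Int))) :
    List ((Int × Int) × PySem.Set (Int × Int)) :=
  states.flatMap (fun st =>
    (([(st.1.1, st.1.2 - 1), (st.1.1, st.1.2 + 1), (st.1.1 - 1, st.1.2), (st.1.1 + 1, st.1.2)] : List (Int × Int)).filter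
      (fun nb => decide (0 ≤ nb.1) && decide (nb.1 < (m.length : Int)) && decide (0 ≤ nb.2)
        && decide (nb.2 < ((m.headD []).length : Int))
        && !(PySem.Set.contains st.2 nb) && decide (pvCellC m nb.1 nb.2 = [ch]))).map
      (fun nb => (nb, PySem.Set.add st.2 nb)))

def findSeqOccurance_alt (m : List (List String)) (s : String) : Int :=
  let nRow := m.length
  let nCol := if m = [] then 0 else (m.headD []).length
  let init := ((((List.range nRow).flatMap (fun r => (List.range nCol).map (fun c => (r, c)))).filter
      (fun p => decide (pvCellC m (p.1 : Int) (p.2 : Int) = [s.toList.getD 0 '?']))).map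
      (fun p => ((((p.1 : Int)), ((p.2 : Int))), PySem.Set.ofList [((p.1 : Int), (p.2 : Int))])))
  (((s.toList.drop 1).foldl (fun sts ch => pvStep m ch sts) init).length : Int)

-- ===== PRECONDITION & SPEC =====
-- Pre_ excludes exactly the inputs where the Python A raises: an empty s while some cell is
-- scanned (IndexError on s[0]) and a matrix whose first row is longer than a later row
-- (IndexError indexing that row); A returns normally everywhere else.
def Pre_findSeqOccurance (m : List (List String)) (s : String) : Prop :=
  (∀ r ∈ m, (m.headD []).length ≤ r.length) ∧ (m = [] ∨ m.headD [] = [] ∨ s.toList ≠ [])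
instance (m : List (List String)) (s : String) : Decidable (Pre_findSeqOccurance m s) := by
  unfold Pre_findSeqOccurance; infer_instance

def pvWitness_findSeqOccurance : List (List String) × String := ([["A", "C"], ["T", "G"]], "AC")

def Spec_findSeqOccurance (m : List (List String)) (s : String) (out : Int) : Prop := out = findSeqOccurance_alt m s
instance (m : List (List String)) (s : String) (out : Int) : Decidable (Spec_findSeqOccurance m s out) := by unfold Spec_findSeqOccurance; infer_instance

-- ===== CLAIM (what is proved, stated in full; the proofs are below) =====
def Claim_equal_findSeqOccurance : Prop := ∀ (m : List (List String)) (s : String), Dom_findSeqOccurance m s → Pre_findSeqOccurance m s → Spec_findSeqOccurance m s (findSeqOccurance m s)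

-- ===== LEMMAS AND PROOFS =====

-- B's whole expansion, as a named function for the lemmas
def pvExpand (m : List (List String)) (states : List ((Int × Int) × PySem.Set (Int × Int)))
    (cs : List Char) : List ((Int × Int) × PySem.Set (Int × Int)) :=
  cs.foldl (fun sts ch => pvStep m ch sts) states

theorem expand_nil (m : List (List String)) (cs : List Char) : pvExpand m [] cs = [] := by
  induction cs with
  | nil => rfl
  | cons c cs ih => simpa [pvExpand, pvStep] using ih

theorem expand_append (m : List (List String)) (cs : List Char)
    (l1 l2 : List ((Int × Int) × PySem.Set (Int × Int))) :
    pvExpand m (l1 ++ l2) cs = pvExpand m l1 cs ++ pvExpand m l2 cs := by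
  induction cs generalizing l1 l2 with
  | nil => rfl
  | cons c cs ih =>
    show pvExpand m (pvStep m c (l1 ++ l2)) cs = _
    rw [show pvStep m c (l1 ++ l2) = pvStep m c l1 ++ pvStep m c l2 from List.flatMap_append ..]
    exact ih _ _

theorem expand_length_sum (m : List (List String)) (cs : List Char)
    (l : List ((Int × Int) × PySem.Set (Int × Int))) :
    ((pvExpand m l cs).length : Int)
      = (l.map (fun st => ((pvExpand m [st] cs).length : Int))).sum := by
  induction l with
  | nil => simp [expand_nil]
  | cons a l ih =>
    rw [show (a :: l) = [a] ++ l from rfl, expand_append]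
    simp only [List.length_append, List.map_append, List.sum_append, List.map_cons,
      List.map_nil, List.sum_cons, List.sum_nil]
    push_cast
    omega

-- a conditional-accumulate step is an additive step
theorem ite_add_shape {α : Type} (C : α → Prop) [DecidablePred C] (G : α → Int) :
    (fun (tot : Int) (nb : α) => if C nb then tot + G nb else tot)
      = fun (tot : Int) (nb : α) => tot + (if C nb then G nb else 0) := by
  funext tot nb; split <;> simp

theorem sum_map_filter {α : Type} (p : α → Bool) (f : α → Int) (l : List α) :
    ((l.filter p).map f).sum = (l.map (fun x => if p x = true then f x else 0)).sum := by
  induction l with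
  | nil => simp
  | cons a l ih =>
    by_cases h : p a = true <;> simp [h, ih]

theorem pathChars_append (m : List (List String)) (path : List (Int × Int)) (nb : Int × Int) :
    pvPathChars m (path ++ [nb]) = pvPathChars m path ++ pvCellC m nb.1 nb.2 := by
  simp [pvPathChars, List.foldl_append]

-- pigeonhole: a duplicate-free list of in-bounds cells has at most nR*nC entries
theorem nodup_inbounds_len (nR nC : Nat) (l : List (Int × Int)) (hnd : l.Nodup)
    (hb : ∀ p ∈ l, 0 ≤ p.1 ∧ p.1 < (nR : Int) ∧ 0 ≤ p.2 ∧ p.2 < (nC : Int)) :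
    l.length ≤ nR * nC := by
  classical
  have henc : ((l.map (fun p : Int × Int => p.2.toNat + p.1.toNat * nC))).Nodup := by
    refine List.Nodup.map_on ?_ hnd
    intro x hx y hy hxy
    obtain ⟨hx1, hx2, hx3, hx4⟩ := hb x hx
    obtain ⟨hy1, hy2, hy3, hy4⟩ := hb y hy
    have hx2' : x.2.toNat < nC := by omega
    have hy2' : y.2.toNat < nC := by omega
    have hnC : 0 < nC := by omega
    have hda : (x.2.toNat + x.1.toNat * nC) / nC = x.1.toNat := by
      rw [Nat.add_mul_div_right _ _ hnC, Nat.div_eq_of_lt hx2', Nat.zero_add]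
    have hdb : (y.2.toNat + y.1.toNat * nC) / nC = y.1.toNat := by
      rw [Nat.add_mul_div_right _ _ hnC, Nat.div_eq_of_lt hy2', Nat.zero_add]
    have hma : (x.2.toNat + x.1.toNat * nC) % nC = x.2.toNat := by
      rw [Nat.add_mul_mod_self_right, Nat.mod_eq_of_lt hx2']
    have hmb : (y.2.toNat + y.1.toNat * nC) % nC = y.2.toNat := by
      rw [Nat.add_mul_mod_self_right, Nat.mod_eq_of_lt hy2']
    have e1 : x.1.toNat = y.1.toNat := by rw [← hda, ← hdb, hxy]
    have e2 : x.2.toNat = y.2.toNat := by rw [← hma, ← hmb, hxy]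
    exact Prod.ext (by omega) (by omega)
  have hlt : ∀ n ∈ l.map (fun p : Int × Int => p.2.toNat + p.1.toNat * nC), n < nR * nC := by
    intro n hn
    obtain ⟨p, hp, rfl⟩ := List.mem_map.mp hn
    obtain ⟨h1, h2, h3, h4⟩ := hb p hp
    have ha : p.1.toNat < nR := by omega
    have hbb : p.2.toNat < nC := by omega
    calc p.2.toNat + p.1.toNat * nC < nC + p.1.toNat * nC := by omega
      _ = (p.1.toNat + 1) * nC := by ring
      _ ≤ nR * nC := Nat.mul_le_mul_right nC ha
  have hsub : (l.map (fun p : Int × Int => p.2.toNat + p.1.toNat * nC)).toFinset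
      ⊆ Finset.range (nR * nC) := by
    intro n hn
    exact Finset.mem_range.mpr (hlt n (List.mem_toFinset.mp hn))
  have := Finset.card_le_card hsub
  rw [List.toFinset_card_of_nodup henc, Finset.card_range] at this
  simpa using this

-- main lemma: A's dfs from a consistent partial state adds exactly the number of states
-- B's frontier expansion of that single state produces
theorem dfs_eq (m : List (List String)) (s : String) :
    ∀ (fuel : Nat) (start : Int × Int) (path : List (Int × Int))
      (visited : PySem.Set (Int × Int)) (count : Int),
      pvPathChars m path = s.toList.take path.length →
      path.length ≤ s.toList.length →
      (∀ x, x ∈ path ↔ PySem.Set.contains visited x = true) →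
      path.Nodup →
      (∀ p ∈ path, 0 ≤ p.1 ∧ p.1 < (m.length : Int) ∧ 0 ≤ p.2 ∧ p.2 < ((m.headD []).length : Int)) →
      m.length * (m.headD []).length + 2 ≤ fuel + path.length →
      pvDfsA m s fuel start path count
        = count + ((pvExpand m [(start, visited)] (s.toList.drop path.length)).length : Int) := by
  intro fuel
  induction fuel with
  | zero =>
    intro start path visited count h1 h2 h3 hnd hbnd hfuel
    exact absurd (nodup_inbounds_len m.length (m.headD []).length path hnd hbnd) (by omega)
  | succ fuel ih =>
    intro start path visited count h1 h2 h3 hnd hbnd hfuel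
    by_cases hfin : pvIsFinal m path s = true
    · have hlen : path.length = s.toList.length := by
        have := hfin
        unfold pvIsFinal at this
        rw [h1] at this
        have htake : s.toList.take path.length = s.toList := beq_iff_eq.mp this
        have h' := congrArg List.length htake
        rw [List.length_take] at h'
        omega
      have hdropnil : s.toList.drop path.length = [] := by rw [hlen]; simp
      simp [pvDfsA, hfin, hdropnil, pvExpand]
    · have hne : path.length ≠ s.toList.length := by
        intro h
        apply hfin
        unfold pvIsFinal
        rw [h1, h]
        simp
      have hlt : path.length < s.toList.length := lt_of_le_of_ne h2 hne
      rw [show pvDfsA m s (fuel + 1) start path count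
            = (pvNeighbors start.1 start.2 (m.length : Int) ((m.headD []).length : Int)).foldl
                (fun cnt nb =>
                  if nb ∉ path ∧ pvCellC m nb.1 nb.2 = [s.toList.getD path.length '?'] then
                    pvDfsA m s fuel nb (path ++ [nb]) cnt
                  else cnt) count from by simp [pvDfsA, hfin]]
      -- B side: peel one layer off the expansion
      have hdrop : s.toList.drop path.length
          = s.toList[path.length] :: s.toList.drop (path.length + 1) :=
        List.drop_eq_getElem_cons hlt
      rw [hdrop]
      rw [show pvExpand m [(start, visited)] (s.toList[path.length] :: s.toList.drop (path.length + 1))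
            = pvExpand m (pvStep m s.toList[path.length] [(start, visited)])
                (s.toList.drop (path.length + 1)) from rfl]
      rw [show pvStep m s.toList[path.length] [(start, visited)]
            = (([(start.1, start.2 - 1), (start.1, start.2 + 1), (start.1 - 1, start.2), (start.1 + 1, start.2)] : List (Int × Int)).filter
                (fun nb => decide (0 ≤ nb.1) && decide (nb.1 < (m.length : Int)) && decide (0 ≤ nb.2)
                  && decide (nb.2 < ((m.headD []).length : Int))
                  && !(PySem.Set.contains visited nb)
                  && decide (pvCellC m nb.1 nb.2 = [s.toList[path.length]]))).map
                (fun nb => (nb, PySem.Set.add visited nb)) from by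
        simp [pvStep]]
      rw [expand_length_sum, List.map_map]
      -- A side: each recursive call is its additive value (the induction hypothesis)
      have hstep : ∀ (cnt : Int), ∀ nb ∈ pvNeighbors start.1 start.2 (m.length : Int) ((m.headD []).length : Int),
          (fun (cnt : Int) (nb : Int × Int) =>
            if nb ∉ path ∧ pvCellC m nb.1 nb.2 = [s.toList.getD path.length '?'] then
              pvDfsA m s fuel nb (path ++ [nb]) cnt
            else cnt) cnt nb
          = (fun (cnt : Int) (nb : Int × Int) =>
              cnt + (if nb ∉ path ∧ pvCellC m nb.1 nb.2 = [s.toList.getD path.length '?'] then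
                ((pvExpand m [(nb, PySem.Set.add visited nb)] (s.toList.drop (path.length + 1))).length : Int)
              else 0)) cnt nb := by
        intro cnt nb hnbmem
        beta_reduce
        by_cases hc : nb ∉ path ∧ pvCellC m nb.1 nb.2 = [s.toList.getD path.length '?']
        · simp only [hc, if_pos]
          have hbnds : 0 ≤ nb.1 ∧ nb.1 < (m.length : Int) ∧ 0 ≤ nb.2 ∧ nb.2 < ((m.headD []).length : Int) := by
            unfold pvNeighbors at hnbmem
            have := List.of_mem_filter hnbmem
            simp only [Bool.and_eq_true, decide_eq_true_eq] at this
            tauto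
          rw [ih nb (path ++ [nb]) (PySem.Set.add visited nb) cnt]
          · simp
          · rw [pathChars_append, h1, hc.2,
                List.getD_eq_getElem s.toList '?' hlt,
                ← List.take_succ_eq_append_getElem hlt]
            simp
          · simpa using hlt
          · intro x
            have hx : x ∈ path ↔ x ∈ visited := (h3 x).trans (PySem.Set.contains_iff visited x)
            rw [PySem.Set.contains_iff, PySem.Set.mem_add, List.mem_append, List.mem_singleton]
            tauto
          · rw [List.nodup_append]
            refine ⟨hnd, List.nodup_singleton _, ?_⟩
            intro a ha b hbm
            rw [List.mem_singleton] at hbm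
            subst hbm
            intro hab
            exact hc.1 (hab ▸ ha)
          · intro p hp
            rcases List.mem_append.mp hp with h | h
            · exact hbnd p h
            · rw [List.mem_singleton.mp h]; exact hbnds
          · simp only [List.length_append, List.length_singleton]; omega
        · rw [if_neg hc, if_neg hc]
          simp
      rw [PySem.List.foldl_congr_mem _ _ _ count hstep, PySem.List.foldl_add]
      congr 1
      simp only [Function.comp_def]
      unfold pvNeighbors
      rw [sum_map_filter, sum_map_filter]
      congr 1
      apply List.map_congr_left
      intro nb _
      have hvis : nb ∉ path ↔ ¬ PySem.Set.contains visited nb = true := not_congr (h3 nb)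
      have hgd : s.toList.getD path.length '?' = s.toList[path.length] :=
        List.getD_eq_getElem s.toList '?' hlt
      by_cases hb : (0 ≤ nb.1 ∧ nb.1 < (m.length : Int) ∧ 0 ≤ nb.2 ∧ nb.2 < ((m.headD []).length : Int))
      · rw [if_pos (show (decide (0 ≤ nb.1) && decide (nb.1 < (m.length : Int)) && decide (0 ≤ nb.2)
              && decide (nb.2 < ((m.headD []).length : Int))) = true by
            simp only [Bool.and_eq_true, decide_eq_true_eq]; tauto)]
        by_cases hc : nb ∉ path ∧ pvCellC m nb.1 nb.2 = [s.toList.getD path.length '?']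
        · rw [if_pos hc, if_pos (show (decide (0 ≤ nb.1) && decide (nb.1 < (m.length : Int)) && decide (0 ≤ nb.2)
              && decide (nb.2 < ((m.headD []).length : Int))
              && !(PySem.Set.contains visited nb)
              && decide (pvCellC m nb.1 nb.2 = [s.toList[path.length]])) = true by
            simp only [Bool.and_eq_true, decide_eq_true_eq, Bool.not_eq_true',
              Bool.not_eq_eq_eq_not, Bool.not_true]
            refine ⟨⟨?_, ?_⟩, by rw [← hgd]; exact hc.2⟩
            · tauto
            · exact Bool.not_eq_true _ ▸ (by
                have := hvis.mp hc.1
                simpa using this))]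
        · rw [if_neg hc, if_neg (show ¬ (decide (0 ≤ nb.1) && decide (nb.1 < (m.length : Int)) && decide (0 ≤ nb.2)
              && decide (nb.2 < ((m.headD []).length : Int))
              && !(PySem.Set.contains visited nb)
              && decide (pvCellC m nb.1 nb.2 = [s.toList[path.length]])) = true by
            simp only [Bool.and_eq_true, decide_eq_true_eq, Bool.not_eq_true']
            intro hall
            exact hc ⟨hvis.mpr (by rw [hall.1.2]; simp), by rw [hgd]; exact hall.2⟩)]
      · rw [if_neg (show ¬ (decide (0 ≤ nb.1) && decide (nb.1 < (m.length : Int)) && decide (0 ≤ nb.2)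
              && decide (nb.2 < ((m.headD []).length : Int))) = true by
            simp only [Bool.and_eq_true, decide_eq_true_eq]; tauto),
            if_neg (show ¬ (decide (0 ≤ nb.1) && decide (nb.1 < (m.length : Int)) && decide (0 ≤ nb.2)
              && decide (nb.2 < ((m.headD []).length : Int))
              && !(PySem.Set.contains visited nb)
              && decide (pvCellC m nb.1 nb.2 = [s.toList[path.length]])) = true by
            simp only [Bool.and_eq_true, decide_eq_true_eq]; tauto)]

theorem nested_fold_sum (nR nC : Nat) (C : Nat → Nat → Prop) [inst : ∀ r c, Decidable (C r c)]
    (G : Nat → Nat → Int) :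
    (List.range nR).foldl (fun count row =>
      (List.range nC).foldl (fun count col => if C row col then count + G row col else count) count) 0
    = ((List.range nR).map (fun row =>
        ((List.range nC).map (fun col => if C row col then G row col else 0)).sum)).sum := by
  have hin : (fun (count : Int) (row : Nat) =>
        (List.range nC).foldl (fun count col => if C row col then count + G row col else count) count)
      = fun (count : Int) (row : Nat) =>
        count + ((List.range nC).map (fun col => if C row col then G row col else 0)).sum := by
    funext count row
    rw [ite_add_shape (C row) (G row), PySem.List.foldl_add]
  rw [hin, PySem.List.foldl_add, zero_add]

theorem sum_flatMap' {α β : Type} (l : List α) (f : α → List β) [AddCommMonoid β] :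
    (l.flatMap f).sum = (l.map (fun x => (f x).sum)).sum := by
  induction l with
  | nil => rfl
  | cons a l ih => simp [List.flatMap_cons, ih]

theorem flat_sum (nR nC : Nat) (P : Nat × Nat → Bool) (G : Nat × Nat → Int) :
    (((((List.range nR).flatMap (fun r => (List.range nC).map (fun c => (r, c)))).filter P).map G)).sum
    = ((List.range nR).map (fun r =>
        ((List.range nC).map (fun c => if P (r, c) = true then G (r, c) else 0)).sum)).sum := by
  rw [sum_map_filter]
  rw [List.map_flatMap, sum_flatMap']
  congr 1
  apply List.map_congr_left
  intro r _
  rw [List.map_map]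
  rfl

-- ===== VERDICT (by name: the statement is the Claim_ definition above) =====
theorem findSeqOccurance_spec : Claim_equal_findSeqOccurance := by
  intro m s _hDom hPre
  unfold Spec_findSeqOccurance findSeqOccurance findSeqOccurance_alt
  have hcol : (if m = [] then 0 else (m.headD []).length) = (m.headD []).length := by
    cases m <;> simp
  simp only [hcol]
  rw [nested_fold_sum (m.length) ((m.headD []).length)
        (fun row col => pvCellC m (row : Int) (col : Int) = [s.toList.getD 0 '?'])
        (fun row col => pvDfsA m s (m.length * (m.headD []).length + 1)
          ((row : Int), (col : Int)) [((row : Int), (col : Int))] 0)]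
  rw [show ((((List.range m.length).flatMap (fun r => (List.range (m.headD []).length).map (fun c => (r, c)))).filter
      (fun p => decide (pvCellC m (p.1 : Int) (p.2 : Int) = [s.toList.getD 0 '?']))).map
      (fun p => ((((p.1 : Int)), ((p.2 : Int))), PySem.Set.ofList [((p.1 : Int), (p.2 : Int))]))) =
    ((((List.range m.length).flatMap (fun r => (List.range (m.headD []).length).map (fun c => (r, c)))).filter
      (fun p => decide (pvCellC m (p.1 : Int) (p.2 : Int) = [s.toList.getD 0 '?']))).map
      (fun p => ((((p.1 : Int)), ((p.2 : Int))), PySem.Set.ofList [((p.1 : Int), (p.2 : Int))]))) from rfl]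
  rw [show (((s.toList.drop 1).foldl (fun sts ch => pvStep m ch sts) _)) = pvExpand m _ (s.toList.drop 1) from rfl]
  rw [expand_length_sum, List.map_map]
  simp only [Function.comp_def]
  rw [flat_sum (m.length) ((m.headD []).length)
        (fun p => decide (pvCellC m (p.1 : Int) (p.2 : Int) = [s.toList.getD 0 '?']))
        (fun p => ((pvExpand m [(((p.1 : Int), (p.2 : Int)), PySem.Set.ofList [((p.1 : Int), (p.2 : Int))])] (s.toList.drop 1)).length : Int))]
  congr 1
  apply List.map_congr_left
  intro row hrow
  congr 1
  apply List.map_congr_left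
  intro col hcoll
  by_cases hcell : pvCellC m (row : Int) (col : Int) = [s.toList.getD 0 '?']
  · rw [if_pos hcell, if_pos (by simpa using hcell)]
    have hmne : m ≠ [] := by
      intro h
      rw [h] at hrow
      simp at hrow
    have hc0 : (m.headD []).length ≠ 0 := by
      intro h
      rw [h] at hcoll
      simp at hcoll
    have hsne : s.toList ≠ [] := by
      rcases hPre.2 with h | h | h
      · exact absurd h hmne
      · exact absurd (congrArg List.length h) (by simpa using hc0)
      · exact h
    have hslen : 1 ≤ s.toList.length := by
      cases hcs : s.toList with
      | nil => exact absurd hcs hsne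
      | cons a l => simp
    have hrow' : row < m.length := List.mem_range.mp hrow
    have hcol' : col < (m.headD []).length := List.mem_range.mp hcoll
    have hd := dfs_eq m s (m.length * (m.headD []).length + 1)
      ((row : Int), (col : Int)) [((row : Int), (col : Int))]
      (PySem.Set.ofList [((row : Int), (col : Int))]) 0
      (by
        simp only [pvPathChars, List.foldl_cons, List.foldl_nil, List.nil_append]
        rw [hcell]
        cases hcs : s.toList with
        | nil => exact absurd hcs hsne
        | cons a l => simp [hcs, List.getD])
      (by simp only [List.length_singleton]; exact hslen)
      (by intro x; simp [PySem.Set.contains_iff])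
      (by simp)
      (by intro p hp
          rw [List.mem_singleton.mp hp]
          refine ⟨?_, ?_, ?_, ?_⟩
          · show (0 : Int) ≤ (row : Int); positivity
          · show (row : Int) < (m.length : Int); exact_mod_cast hrow'
          · show (0 : Int) ≤ (col : Int); positivity
          · show (col : Int) < ((m.headD []).length : Int); exact_mod_cast hcol' )
      (by simp only [List.length_singleton]; omega)
    simpa using hd
  · rw [if_neg hcell, if_neg (by simpa using hcell)]
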